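-- pv_equiv track=rewrite | github.com/jwilson232/japanese-resources | wanikani-lesson-overview/main.py | separate_lesson_types
-- ===== SOURCE A (Python) =====
-- def separate_lesson_types(lessons: list) -> dict:
--     radical = []
--     kanji = []
--     vocabulary = []
--
--     for lesson in lessons:
--         lesson_type = lesson["object"]
--         if lesson_type == "radical":
--             radical.append(lesson)
--         if lesson_type == "kanji":
--             kanji.append(lesson)
--         if lesson_type == "vocabulary":
--             vocabulary.append(lesson)
--
--     lesson_dict = {
--         "radical": radical,
--         "kanji": kanji,
--         "vocabulary": vocabulary
--     }
--
--     return lesson_dict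
-- ===== SOURCE B (Python) =====
-- def separate_lesson_types(lessons: list) -> dict:
--     return {t: [lesson for lesson in lessons if lesson["object"] == t]
--             for t in ("radical", "kanji", "vocabulary")}
-- ===== Notes on version B (the rewrite author's own statement) =====
-- stated objective: simpler
-- what changed: Replaces the single accumulating pass with three mutable lists by three independent filter passes, one per lesson type, expressed as a dict comprehension with no mutable state.
import Mathlib
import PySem

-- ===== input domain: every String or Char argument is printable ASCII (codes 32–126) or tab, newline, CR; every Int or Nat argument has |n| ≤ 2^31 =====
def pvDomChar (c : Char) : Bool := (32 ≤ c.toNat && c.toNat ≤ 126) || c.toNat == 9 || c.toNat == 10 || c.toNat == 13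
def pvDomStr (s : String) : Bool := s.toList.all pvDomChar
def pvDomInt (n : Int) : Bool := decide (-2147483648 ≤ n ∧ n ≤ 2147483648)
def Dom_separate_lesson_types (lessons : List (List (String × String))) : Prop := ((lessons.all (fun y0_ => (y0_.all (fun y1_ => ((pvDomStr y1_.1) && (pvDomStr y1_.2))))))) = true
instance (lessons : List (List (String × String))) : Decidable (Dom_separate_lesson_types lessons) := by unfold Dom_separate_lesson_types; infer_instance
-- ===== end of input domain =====

-- B replaces the single accumulating pass (three mutable lists, three branches) by three
-- independent filter passes, one per type, as a dict comprehension (objective: simpler).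

-- ===== PORT A =====
-- A: one loop, three accumulator lists, three independent equality branches, dict literal at the end.
def separate_lesson_types (lessons : List (List (String × String))) : List (String × List (List (String × String))) :=
  let st := lessons.foldl
    (fun (acc : List (List (String × String)) × List (List (String × String)) × List (List (String × String))) lesson =>
      match (PySem.Dict.ofList lesson).get? "object" with
      | none => acc      -- Python raises KeyError here; excluded by Pre_
      | some t =>
        let acc := if t == "radical" then (acc.1 ++ [lesson], acc.2.1, acc.2.2) else acc
        let acc := if t == "kanji" then (acc.1, acc.2.1 ++ [lesson], acc.2.2) else acc
        if t == "vocabulary" then (acc.1, acc.2.1, acc.2.2 ++ [lesson]) else acc)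
    ([], [], [])
  [("radical", st.1), ("kanji", st.2.1), ("vocabulary", st.2.2)]

-- ===== PORT B =====
-- B: dict comprehension {t: [lesson for lesson in lessons if lesson["object"] == t] for t in (...)},
-- i.e. one filter pass over the whole list per type.
def separate_lesson_types_alt (lessons : List (List (String × String))) : List (String × List (List (String × String))) :=
  ["radical", "kanji", "vocabulary"].map (fun t =>
    (t, lessons.filter (fun lesson =>
          match (PySem.Dict.ofList lesson).get? "object" with
          | none => false   -- Python raises KeyError here; excluded by Pre_
          | some u => u == t)))

-- ===== PRECONDITION & SPEC =====
-- Pre_ excludes exactly the inputs where lesson["object"] raises KeyError (a lesson without the key "object").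
def Pre_separate_lesson_types (lessons : List (List (String × String))) : Prop :=
  lessons.all (fun lesson => lesson.any (fun p => p.1 == "object")) = true
instance (lessons : List (List (String × String))) : Decidable (Pre_separate_lesson_types lessons) := by unfold Pre_separate_lesson_types; infer_instance
def pvWitness_separate_lesson_types : (List (List (String × String))) :=
  [[("object", "kanji"), ("id", "7")], [("object", "radical")], [("object", "other")]]

def Spec_separate_lesson_types (lessons : List (List (String × String))) (out : List (String × List (List (String × String)))) : Prop := out = separate_lesson_types_alt lessons
instance (lessons : List (List (String × String))) (out : List (String × List (List (String × String)))) : Decidable (Spec_separate_lesson_types lessons out) := by unfold Spec_separate_lesson_types; infer_instance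

-- ===== CLAIM (what is proved, stated in full; the proofs are below) =====
def Claim_equal_separate_lesson_types : Prop := ∀ (lessons : List (List (String × String))), Dom_separate_lesson_types lessons → Pre_separate_lesson_types lessons → Spec_separate_lesson_types lessons (separate_lesson_types lessons)

-- ===== LEMMAS AND PROOFS =====

-- A's loop body, named so the invariant lemma can be stated about it (defeq to the lambda in the port).
def pvStepA (acc : List (List (String × String)) × List (List (String × String)) × List (List (String × String)))
    (lesson : List (String × String)) :
    List (List (String × String)) × List (List (String × String)) × List (List (String × String)) :=
  match (PySem.Dict.ofList lesson).get? "object" with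
  | none => acc
  | some t =>
    let acc := if t == "radical" then (acc.1 ++ [lesson], acc.2.1, acc.2.2) else acc
    let acc := if t == "kanji" then (acc.1, acc.2.1 ++ [lesson], acc.2.2) else acc
    if t == "vocabulary" then (acc.1, acc.2.1, acc.2.2 ++ [lesson]) else acc

-- B's per-type filter predicate.
def pvIsType (t : String) (lesson : List (String × String)) : Bool :=
  match (PySem.Dict.ofList lesson).get? "object" with
  | none => false
  | some u => u == t

-- Invariant: A's three accumulators are the three filters appended to their start values.
theorem pv_fold_filter (lessons : List (List (String × String)))
    (r k v : List (List (String × String))) :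
    lessons.foldl pvStepA (r, k, v)
      = (r ++ lessons.filter (pvIsType "radical"),
         k ++ lessons.filter (pvIsType "kanji"),
         v ++ lessons.filter (pvIsType "vocabulary")) := by
  induction lessons generalizing r k v with
  | nil => simp
  | cons lesson rest ih =>
    simp only [List.foldl_cons, List.filter_cons]
    cases h : (PySem.Dict.ofList lesson).get? "object" with
    | none =>
      rw [show pvStepA (r, k, v) lesson = (r, k, v) from by simp [pvStepA, h]]
      simp only [pvIsType, h]
      exact ih r k v
    | some t =>
      have hA : pvStepA (r, k, v) lesson =
          (if t = "radical" then r ++ [lesson] else r,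
           if t = "kanji" then k ++ [lesson] else k,
           if t = "vocabulary" then v ++ [lesson] else v) := by
        simp only [pvStepA, h, beq_iff_eq]
        by_cases h1 : t = "radical" <;> by_cases h2 : t = "kanji" <;> by_cases h3 : t = "vocabulary" <;>
          simp_all
      rw [hA]
      simp only [pvIsType, h, beq_iff_eq]
      by_cases h1 : t = "radical" <;> by_cases h2 : t = "kanji" <;> by_cases h3 : t = "vocabulary" <;>
        simp_all

-- ===== VERDICT (by name: the statement is the Claim_ definition above) =====
theorem separate_lesson_types_spec : Claim_equal_separate_lesson_types := by
  intro lessons _ _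
  show separate_lesson_types lessons = separate_lesson_types_alt lessons
  show [("radical", (lessons.foldl pvStepA ([], [], [])).1),
        ("kanji", (lessons.foldl pvStepA ([], [], [])).2.1),
        ("vocabulary", (lessons.foldl pvStepA ([], [], [])).2.2)]
      = ["radical", "kanji", "vocabulary"].map (fun t => (t, lessons.filter (pvIsType t)))
  rw [pv_fold_filter lessons [] [] []]
  simp [List.map]
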